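-- pv_equiv track=rewrite | github.com/Matteo-Candi/Master-Thesis | benchmark/Python_formatted.py | check_reverse
-- ===== SOURCE A (Python) =====
-- def check_reverse(left_sum, right_sum):
--     rev = 0
--     temp = right_sum
--     while temp != 0:
--         rev = rev * 10 + temp % 10
--         temp //= 10
--     if rev == left_sum:
--         return True
--     return False
-- ===== SOURCE B (Python) =====
-- def check_reverse(left_sum, right_sum):
--     rev = 0
--     for ch in reversed(str(right_sum)):
--         rev = rev * 10 + (ord(ch) - 48)
--     return rev == left_sum
-- ===== Notes on version B (the rewrite author's own statement) =====
-- stated objective: alternative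
-- what changed: B reverses the number by iterating over the characters of str(right_sum) in reverse (ord(ch)-48 per digit) instead of peeling digits arithmetically with % and //; Pre_ excludes right_sum < 0, where A loops forever (temp //= 10 sticks at -1) and so never returns.
import Mathlib
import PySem

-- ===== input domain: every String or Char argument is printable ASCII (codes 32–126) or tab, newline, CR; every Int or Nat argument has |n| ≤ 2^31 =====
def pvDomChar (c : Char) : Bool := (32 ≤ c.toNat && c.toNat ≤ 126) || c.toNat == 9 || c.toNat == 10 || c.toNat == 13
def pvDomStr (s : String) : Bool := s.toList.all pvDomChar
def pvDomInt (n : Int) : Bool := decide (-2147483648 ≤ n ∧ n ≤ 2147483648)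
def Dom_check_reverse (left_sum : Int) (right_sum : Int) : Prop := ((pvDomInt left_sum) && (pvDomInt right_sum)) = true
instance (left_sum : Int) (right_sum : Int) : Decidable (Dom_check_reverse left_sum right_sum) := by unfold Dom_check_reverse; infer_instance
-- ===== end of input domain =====

-- B reverses right_sum via its decimal string (fold over reversed str(right_sum)) instead of %/// digit peeling;
-- Pre_ excludes right_sum < 0, where Python A loops forever and returns nothing.


-- ===== PORT A =====
-- while temp != 0: rev = rev*10 + temp % 10; temp //= 10   — fuel natAbs+1 only makes the loop total;
-- for 0 ≤ temp it is more than the number of iterations, so the fuel is never exhausted on Pre_.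
def pvRevLoopA : Nat → Int → Int → Int
  | 0, rev, _ => rev
  | f + 1, rev, temp =>
    if temp ≠ 0 then
      pvRevLoopA f (rev * 10 + PySem.Int.mod temp 10) (PySem.Int.floordiv temp 10)
    else rev

def check_reverse (left_sum : Int) (right_sum : Int) : Bool :=
  if pvRevLoopA (right_sum.natAbs + 1) 0 right_sum = left_sum then true else false

-- ===== PORT B =====
-- rev = 0; for ch in reversed(str(right_sum)): rev = rev*10 + (ord(ch) - 48); return rev == left_sum
def check_reverse_alt (left_sum : Int) (right_sum : Int) : Bool :=
  decide (((PySem.Int.toChars right_sum).reverse.foldl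
      (fun rev c => rev * 10 + ((c.toNat : Int) - 48)) 0) = left_sum)

-- ===== PRECONDITION & SPEC =====
-- Pre_ excludes right_sum < 0: there Python A never terminates (temp //= 10 sticks at -1), so A returns no value.
def Pre_check_reverse (left_sum : Int) (right_sum : Int) : Prop := 0 ≤ right_sum
instance (left_sum : Int) (right_sum : Int) : Decidable (Pre_check_reverse left_sum right_sum) := by
  unfold Pre_check_reverse; infer_instance

def pvWitness_check_reverse : Int × Int := (21, 12)

def Spec_check_reverse (left_sum : Int) (right_sum : Int) (out : Bool) : Prop := out = check_reverse_alt left_sum right_sum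
instance (left_sum : Int) (right_sum : Int) (out : Bool) : Decidable (Spec_check_reverse left_sum right_sum out) := by unfold Spec_check_reverse; infer_instance

-- ===== CLAIM (what is proved, stated in full; the proofs are below) =====
def Claim_equal_check_reverse : Prop := ∀ (left_sum : Int) (right_sum : Int), Dom_check_reverse left_sum right_sum → Pre_check_reverse left_sum right_sum → Spec_check_reverse left_sum right_sum (check_reverse left_sum right_sum)

-- ===== LEMMAS AND PROOFS =====

-- Common model: the digit-reversal fold both programs compute, on a natural number.
def pvL (m : Nat) (acc : Int) : Int :=
  if h : m = 0 then acc else pvL (m / 10) (acc * 10 + (m % 10 : Nat))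
  decreasing_by exact Nat.div_lt_self (Nat.pos_of_ne_zero h) (by omega)

lemma pvRevLoopA_eq : ∀ (f m : Nat) (acc : Int), m < f → pvRevLoopA f acc (m : Int) = pvL m acc := by
  intro f
  induction f with
  | zero => intro m acc h; omega
  | succ f ih =>
    intro m acc h
    by_cases hm : m = 0
    · subst hm; simp [pvRevLoopA, pvL]
    · rw [pvRevLoopA, if_pos (by exact_mod_cast hm)]
      rw [show PySem.Int.mod (m : Int) 10 = ((m % 10 : Nat) : Int) from by
            exact_mod_cast PySem.Int.mod_natCast m 10,
          show PySem.Int.floordiv (m : Int) 10 = ((m / 10 : Nat) : Int) from by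
            exact_mod_cast PySem.Int.floordiv_natCast m 10]
      rw [ih (m / 10) _ (by omega)]
      conv_rhs => rw [pvL]
      rw [dif_neg hm]

-- str(m) for m : Nat, as the structural recursion "high digits ++ [last digit]".
def pvRdc (n : Nat) : List Char :=
  if h : n < 10 then [Nat.digitChar n]
  else pvRdc (n / 10) ++ [Nat.digitChar (n % 10)]
  decreasing_by exact Nat.div_lt_self (by omega) (by omega)

lemma pvToDigitsCore_eq : ∀ (f n : Nat) (l : List Char), n < f →
    Nat.toDigitsCore 10 f n l = pvRdc n ++ l := by
  intro f
  induction f with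
  | zero => intro n l h; omega
  | succ f ih =>
    intro n l h
    rw [Nat.toDigitsCore]
    by_cases h10 : n / 10 = 0
    · simp only [h10, if_pos]
      rw [pvRdc, dif_pos (by omega)]
      have : n % 10 = n := Nat.mod_eq_of_lt (by omega)
      simp [this]
    · simp only [h10, if_neg, if_false]
      have hlt : n / 10 < f := by
        have h1 : n / 10 < n := Nat.div_lt_self (by omega) (by omega)
        omega
      rw [ih (n / 10) _ hlt]
      have h10' : ¬ n < 10 := fun hsm => h10 (Nat.div_eq_of_lt hsm)
      conv_rhs => rw [pvRdc]
      rw [dif_neg h10']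
      simp

lemma pvToDigits_eq (n : Nat) : Nat.toDigits 10 n = pvRdc n := by
  rw [Nat.toDigits]
  simpa using pvToDigitsCore_eq (n + 1) n [] (Nat.lt_succ_self n)

lemma pvDigitChar_toNat (d : Nat) (h : d < 10) : ((Nat.digitChar d).toNat : Int) - 48 = (d : Int) := by
  interval_cases d <;> decide

lemma pvFold_rdc : ∀ (n : Nat) (acc : Int), n ≠ 0 →
    (pvRdc n).reverse.foldl (fun rev c => rev * 10 + ((c.toNat : Int) - 48)) acc = pvL n acc := by
  intro n
  induction n using Nat.strong_induction_on with
  | _ n ih =>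
    intro acc hn
    by_cases h : n < 10
    · rw [pvRdc, dif_pos h]
      simp only [List.reverse_singleton, List.foldl_cons, List.foldl_nil]
      rw [pvDigitChar_toNat n h, pvL, dif_neg hn, Nat.div_eq_of_lt h, Nat.mod_eq_of_lt h]
      simp [pvL]
    · rw [pvRdc, dif_neg h]
      simp only [List.reverse_append, List.reverse_singleton, List.singleton_append,
        List.foldl_cons]
      rw [pvDigitChar_toNat (n % 10) (by omega)]
      rw [ih (n / 10) (Nat.div_lt_self (by omega) (by omega)) _ (by omega)]
      conv_rhs => rw [pvL, dif_neg hn]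

-- ===== VERDICT (by name: the statement is the Claim_ definition above) =====
theorem check_reverse_spec : Claim_equal_check_reverse := by
  intro left_sum right_sum _ hpre
  unfold Spec_check_reverse check_reverse check_reverse_alt
  obtain ⟨m, rfl⟩ : ∃ m : Nat, right_sum = (m : Int) :=
    ⟨right_sum.toNat, (Int.toNat_of_nonneg hpre).symm⟩
  have hA : pvRevLoopA ((m : Int).natAbs + 1) 0 (m : Int) = pvL m 0 := by
    rw [Int.natAbs_natCast]
    exact pvRevLoopA_eq (m + 1) m 0 (Nat.lt_succ_self m)
  have hchars : PySem.Int.toChars (m : Int) = pvRdc m := by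
    unfold PySem.Int.toChars
    rw [if_neg (by omega), Int.toNat_natCast, pvToDigits_eq]
  rw [hA, hchars]
  by_cases hm : m = 0
  · subst hm
    have hq : pvRdc 0 = ['0'] := by rw [pvRdc]; decide
    have h0 : (pvRdc 0).reverse.foldl (fun rev c => rev * 10 + ((c.toNat : Int) - 48)) 0 = 0 := by
      rw [hq]; decide
    have h1 : pvL 0 0 = 0 := by rw [pvL]; norm_num
    rw [h0, h1]
    split_ifs with h <;> simp [h]
  · rw [pvFold_rdc m 0 hm]
    split_ifs with h <;> simp [h]
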